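-- pv_equiv track=rewrite | github.com/goodmanjonathan/icpc-code | pills.py | solve
-- ===== SOURCE A (Python) =====
-- sltn_dict = {}
--
-- def solve(whole_amt, half_amt):
--     if (whole_amt, half_amt) in sltn_dict:
--         return sltn_dict[(whole_amt, half_amt)]
--
--     if whole_amt == 1 and half_amt == 0:
--         return 1
--     elif whole_amt == 0 and half_amt > 0:
--         return 1
--     else:
--         eat_whole_sltn = solve(whole_amt - 1, half_amt + 1)
--         eat_half_sltn = solve(whole_amt, half_amt - 1) if half_amt > 0 else 0
--
--         sltn_dict[(whole_amt, half_amt)] = eat_whole_sltn + eat_half_sltn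
--         return eat_whole_sltn + eat_half_sltn
-- ===== SOURCE B (Python) =====
-- def _binom(n, k):
--     if k < 0 or k > n:
--         return 0
--     k = min(k, n - k)
--     r = 1
--     for i in range(1, k + 1):
--         r = r * (n - k + i) // i
--     return r
--
-- def solve(whole_amt, half_amt):
--     # ballot-style closed form: C(2w+h, w) - C(2w+h, w-1)
--     n = 2 * whole_amt + half_amt
--     return _binom(n, whole_amt) - _binom(n, whole_amt - 1)
-- ===== Notes on version B (the rewrite author's own statement) =====
-- stated objective: faster
-- what changed: Replaced the memoized recursion over (whole,half) by the closed-form ballot number C(2w+h,w) - C(2w+h,w-1), each binomial computed by one multiplicative loop.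
-- outside the precondition, e.g. on solve(3, -1): A returns 2, B returns 0
import Mathlib
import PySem

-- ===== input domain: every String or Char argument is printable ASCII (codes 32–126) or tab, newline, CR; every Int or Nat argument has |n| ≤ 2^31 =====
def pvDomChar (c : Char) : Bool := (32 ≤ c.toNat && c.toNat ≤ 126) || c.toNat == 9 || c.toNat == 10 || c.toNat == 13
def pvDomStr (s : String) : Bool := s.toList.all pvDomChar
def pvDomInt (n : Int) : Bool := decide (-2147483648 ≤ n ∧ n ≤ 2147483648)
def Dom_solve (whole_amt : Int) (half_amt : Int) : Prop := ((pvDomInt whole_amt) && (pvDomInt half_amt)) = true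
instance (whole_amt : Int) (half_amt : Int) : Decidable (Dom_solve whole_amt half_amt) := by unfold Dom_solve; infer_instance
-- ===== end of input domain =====

-- B replaces A's memoized recursion by the closed-form ballot number
-- C(2w+h, w) - C(2w+h, w-1); the equivalence proved is about the RETURN value
-- (A's module-level memo dict is modelled as state local to one call: it only caches
-- values A itself computes, so it never changes the value A returns).

-- ===== PORT A =====
-- the recursion of Source A with its memo dict (a hash map) threaded through; the fuel argument is a
-- Lean termination artefact, always sufficient on Pre_ (fuel = 2w+h+1 > recursion depth)
def solveGo : Nat → Int → Int → Std.HashMap (Int × Int) Int → Int × Std.HashMap (Int × Int) Int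
  | 0, _, _, d => (0, d)
  | fuel+1, w, h, d =>
    match d.get? (w, h) with
    | some v => (v, d)
    | none =>
      if w = 1 ∧ h = 0 then (1, d)
      else if w = 0 ∧ h > 0 then (1, d)
      else
        let p := solveGo fuel (w - 1) (h + 1) d
        let q := if h > 0 then solveGo fuel w (h - 1) p.2 else (0, p.2)
        (p.1 + q.1, q.2.insert (w, h) (p.1 + q.1))

def solve (whole_amt : Int) (half_amt : Int) : Int :=
  (solveGo ((2 * whole_amt + half_amt).toNat + 1) whole_amt half_amt Std.HashMap.emptyWithCapacity).1

-- ===== PORT B =====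
-- port of Source B's _binom: the k<0/k>n guard, the symmetry reduction, the multiplicative loop
def binomPy (n k : Int) : Int :=
  if k < 0 ∨ k > n then 0
  else
    let k' := min k (n - k)
    (PySem.List.pyRange 1 (k' + 1) 1).foldl
      (fun r i => PySem.Int.floordiv (r * (n - k' + i)) i) 1

def solve_alt (whole_amt : Int) (half_amt : Int) : Int :=
  let n := 2 * whole_amt + half_amt
  binomPy n whole_amt - binomPy n (whole_amt - 1)

-- ===== PRECONDITION & SPEC =====
-- Pre_ is the natural domain: nonnegative pill counts with at least one pill.
-- Outside it A usually recurses forever (RecursionError: whole_amt < 0, or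
-- half_amt ≤ 0 with whole_amt + half_amt ≤ 0); for half_amt < 0 with
-- whole_amt + half_amt ≥ 1 A still returns a value, but one that merely mirrors its
-- unconditional descent (solve(w,h) = solve(w+h,0)), while B returns its closed
-- form — those inputs are excluded, see the cite in claim.json.
def Pre_solve (whole_amt : Int) (half_amt : Int) : Prop :=
  (1 ≤ whole_amt ∧ 0 ≤ half_amt) ∨ (whole_amt = 0 ∧ 1 ≤ half_amt)
instance (whole_amt : Int) (half_amt : Int) : Decidable (Pre_solve whole_amt half_amt) := by
  unfold Pre_solve; infer_instance

def pvWitness_solve : Int × Int := (2, 1)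

def Spec_solve (whole_amt : Int) (half_amt : Int) (out : Int) : Prop := out = solve_alt whole_amt half_amt
instance (whole_amt : Int) (half_amt : Int) (out : Int) : Decidable (Spec_solve whole_amt half_amt out) := by unfold Spec_solve; infer_instance

-- ===== CLAIM (what is proved, stated in full; the proofs are below) =====
def Claim_equal_solve : Prop := ∀ (whole_amt : Int) (half_amt : Int), Dom_solve whole_amt half_amt → Pre_solve whole_amt half_amt → Spec_solve whole_amt half_amt (solve whole_amt half_amt)


-- ===== LEMMAS AND PROOFS =====

theorem hm_get?_insert (m : Std.HashMap (Int × Int) Int) (k a : Int × Int) (v : Int) :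
    (m.insert k v).get? a = if a = k then some v else m.get? a := by
  by_cases hak : a = k
  · subst hak; simp [Std.HashMap.get?_eq_getElem?, Std.HashMap.getElem?_insert]
  · simp [Std.HashMap.get?_eq_getElem?, Std.HashMap.getElem?_insert, hak, Ne.symm hak]

def chooseZ (n k : Int) : Int :=
  if 0 ≤ n ∧ 0 ≤ k ∧ k ≤ n then ((n.toNat.choose k.toNat : Nat) : Int) else 0

theorem binomPy_loop (N K : Nat) (hK : K ≤ N) (j : Nat) (hj : j ≤ K) :
    (PySem.List.pyRange 1 ((j : Int) + 1) 1).foldl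
      (fun r i => PySem.Int.floordiv (r * ((N : Int) - (K : Int) + i)) i) 1
    = ((N - K + j).choose j : Int) := by
  induction j with
  | zero => simp [PySem.List.pyRange_one_eq_nil (by norm_num : (1:Int) ≤ 1)]
  | succ j ih =>
    have hj' : j ≤ K := by omega
    have hsplit : ((j+1 : ℕ) : ℤ) + 1 = ((j:ℤ)+1) + 1 := by push_cast; ring
    rw [hsplit, PySem.List.pyRange_one_succ_right (by omega), List.foldl_append, ih hj']
    simp only [List.foldl_cons, List.foldl_nil]
    have hM : (N:ℤ) - (K:ℤ) = ((N - K : ℕ) : ℤ) := by omega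
    set M := N - K with hMdef
    have hnat : (M + j + 1) * (M + j).choose j = (M + j + 1).choose (j + 1) * (j + 1) :=
      Nat.add_one_mul_choose_eq (M + j) j
    have hcast : ((M + j).choose j : ℤ) * ((N:ℤ) - (K:ℤ) + ((j:ℤ) + 1))
        = ((M + (j+1)).choose (j+1) : ℤ) * ((j:ℤ) + 1) := by
      have h2 : ((M + j + 1) * (M + j).choose j : ℤ) = ((M + j + 1).choose (j + 1) * (j + 1) : ℤ) := by
        exact_mod_cast hnat
      rw [hM]
      push_cast at h2 ⊢
      linear_combination h2
    rw [hcast, PySem.Int.floordiv_eq_ediv_of_pos (by omega)]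
    exact Int.mul_ediv_cancel _ (by omega)

theorem binomPy_eq_chooseZ (n k : Int) (hn : 0 ≤ n) : binomPy n k = chooseZ n k := by
  unfold binomPy
  split_ifs with h
  · unfold chooseZ
    rw [if_neg (by omega)]
  · have hk0 : 0 ≤ k := by omega
    have hkn : k ≤ n := by omega
    have hk'0 : 0 ≤ min k (n - k) := by omega
    have hk'2 : min k (n - k) ≤ n - min k (n - k) := by omega
    set K := (min k (n - k)).toNat with hKdef
    have hkK : min k (n - k) = (K : ℤ) := by omega
    have hnN : n = ((n.toNat : ℕ) : ℤ) := by omega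
    have hKN : K ≤ n.toNat := by omega
    have hfold : (PySem.List.pyRange 1 ((K : ℤ) + 1) 1).foldl
        (fun r i => PySem.Int.floordiv (r * ((n.toNat : ℤ) - (K : ℤ) + i)) i) 1
        = ((n.toNat - K + K).choose K : ℤ) := binomPy_loop n.toNat K hKN K le_rfl
    simp only [hkK]
    rw [show (fun r i => PySem.Int.floordiv (r * (n - (K:ℤ) + i)) i)
          = (fun r i => PySem.Int.floordiv (r * ((n.toNat : ℤ) - (K : ℤ) + i)) i) by
        funext r i; rw [← hnN]]
    rw [hfold, Nat.sub_add_cancel hKN]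
    unfold chooseZ
    rw [if_pos (by omega)]
    rcases min_choice k (n - k) with hmin | hmin
    · rw [hKdef, hmin]
    · rw [hKdef, hmin]
      have : (n - k).toNat = n.toNat - k.toNat := by omega
      rw [this, Nat.choose_symm (by omega)]

def F (w h : Int) : Int := chooseZ (2*w+h) w - chooseZ (2*w+h) (w-1)

theorem F_base (h : Int) (hh : 1 ≤ h) : F 0 h = 1 := by
  unfold F chooseZ
  rw [if_pos (by omega), if_neg (by omega)]
  simp

theorem chooseZ_eq (n k : Int) (hn : 0 ≤ n) (hk : 0 ≤ k) :
    chooseZ n k = (n.toNat.choose k.toNat : Int) := by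
  unfold chooseZ
  split_ifs with h
  · rfl
  · have : n.toNat < k.toNat := by omega
    simp [Nat.choose_eq_zero_of_lt this]

theorem chooseZ_of_neg (n k : Int) (hk : k < 0) : chooseZ n k = 0 := by
  unfold chooseZ; rw [if_neg (by omega)]

theorem chooseZ_zero (n : Int) (hn : 0 ≤ n) : chooseZ n 0 = 1 := by
  rw [chooseZ_eq n 0 hn le_rfl]; simp

theorem chooseZ_one (n : Int) (hn : 1 ≤ n) : chooseZ n 1 = n := by
  rw [chooseZ_eq n 1 (by omega) (by omega)]
  simp [Nat.choose_one_right]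
  omega

theorem chooseZ_pascal (n k : Int) (hn : 1 ≤ n) (hk : 1 ≤ k) :
    chooseZ n k = chooseZ (n-1) (k-1) + chooseZ (n-1) k := by
  rw [chooseZ_eq n k (by omega) (by omega), chooseZ_eq (n-1) (k-1) (by omega) (by omega),
      chooseZ_eq (n-1) k (by omega) (by omega)]
  have h1 : n.toNat = (n-1).toNat + 1 := by omega
  have h2 : k.toNat = (k-1).toNat + 1 := by omega
  rw [h1, h2, Nat.choose_succ_succ]
  push_cast
  ring

theorem chooseZ_symm (n k : Int) (h0 : 0 ≤ k) (hkn : k ≤ n) :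
    chooseZ n (n - k) = chooseZ n k := by
  rw [chooseZ_eq n (n-k) (by omega) (by omega), chooseZ_eq n k (by omega) (by omega)]
  have h1 : (n - k).toNat = n.toNat - k.toNat := by omega
  rw [h1, Nat.choose_symm (by omega)]

theorem F_rec (w h : Int) (hw : 1 ≤ w) (hh : 0 ≤ h) (hnb : ¬ (w = 1 ∧ h = 0)) :
    F w h = F (w-1) (h+1) + (if h > 0 then F w (h-1) else 0) := by
  unfold F
  rw [show 2*(w-1)+(h+1) = 2*w+h-1 from by ring]
  by_cases hpos : h > 0
  · rw [if_pos hpos, show 2*w+(h-1) = 2*w+h-1 from by ring]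
    have pascal1 : chooseZ (2*w+h) w = chooseZ (2*w+h-1) (w-1) + chooseZ (2*w+h-1) w := by
      rw [chooseZ_pascal (2*w+h) w (by omega) hw]
    by_cases hw2 : 2 ≤ w
    · have pascal2 : chooseZ (2*w+h) (w-1) = chooseZ (2*w+h-1) (w-1-1) + chooseZ (2*w+h-1) (w-1) := by
        rw [chooseZ_pascal (2*w+h) (w-1) (by omega) (by omega)]
      linarith [pascal1, pascal2]
    · have hw1 : w = 1 := by omega
      subst hw1
      simp only [show (1:Int)-1 = 0 from by norm_num]
      rw [chooseZ_zero (2*1+h) (by omega), chooseZ_zero (2*1+h-1) (by omega),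
          chooseZ_of_neg (2*1+h-1) (0-1) (by norm_num),
          chooseZ_one (2*1+h) (by omega), chooseZ_one (2*1+h-1) (by omega)]
      ring
  · rw [if_neg hpos]
    have h0 : h = 0 := by omega
    subst h0
    have hw2 : 2 ≤ w := by omega
    have pascal1 : chooseZ (2*w+0) w = chooseZ (2*w+0-1) (w-1) + chooseZ (2*w+0-1) w := by
      rw [chooseZ_pascal (2*w+0) w (by omega) hw]
    have pascal2 : chooseZ (2*w+0) (w-1) = chooseZ (2*w+0-1) (w-1-1) + chooseZ (2*w+0-1) (w-1) := by
      rw [chooseZ_pascal (2*w+0) (w-1) (by omega) (by omega)]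
    have symm : chooseZ (2*w+0-1) w = chooseZ (2*w+0-1) (w-1) := by
      have := chooseZ_symm (2*w+0-1) (w-1) (by omega) (by omega)
      rw [show 2*w+0-1-(w-1) = w from by ring] at this
      exact this
    linarith [pascal1, pascal2, symm]

def MemoInv (d : Std.HashMap (Int × Int) Int) : Prop :=
  ∀ w h v, d.get? (w, h) = some v → Pre_solve w h ∧ v = F w h

theorem F_one_zero : F 1 0 = 1 := by decide

theorem solveGo_correct (fuel : Nat) :
    ∀ (w h : Int) (d : Std.HashMap (Int × Int) Int), Pre_solve w h →
    (2*w+h).toNat < fuel → MemoInv d →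
    (solveGo fuel w h d).1 = F w h ∧ MemoInv (solveGo fuel w h d).2 := by
  induction fuel with
  | zero => intro w h d _ hf _; omega
  | succ fuel ih =>
    intro w h d hp hf hinv
    cases hm : d.get? (w, h) with
    | some v =>
      obtain ⟨_, hv⟩ := hinv w h v hm
      rw [Std.HashMap.get?_eq_getElem?] at hm
      simp [solveGo, hm, hv, hinv]
    | none =>
      rw [Std.HashMap.get?_eq_getElem?] at hm
      by_cases hb1 : w = 1 ∧ h = 0
      · obtain ⟨hw1, hh0⟩ := hb1
        subst hw1; subst hh0
        simp [solveGo, hm, F_one_zero, hinv]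
      · by_cases hb2 : w = 0 ∧ h > 0
        · obtain ⟨hw0, hh1⟩ := hb2
          subst hw0
          simp [solveGo, hm, hh1, F_base h hh1, hinv]
        · -- else branch
          have hw1 : 1 ≤ w := by
            unfold Pre_solve at hp; omega
          have hh0 : 0 ≤ h := by unfold Pre_solve at hp; omega
          have hside : 2 ≤ w ∨ 1 ≤ h := by
            unfold Pre_solve at hp; omega
          have hpre1 : Pre_solve (w-1) (h+1) := by unfold Pre_solve; omega
          have hf1 : (2*(w-1)+(h+1)).toNat < fuel := by omega
          obtain ⟨hv1, hinv1⟩ := ih (w-1) (h+1) d hpre1 hf1 hinv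
          by_cases hpos : h > 0
          · have hpre2 : Pre_solve w (h-1) := by unfold Pre_solve; omega
            have hf2 : (2*w+(h-1)).toNat < fuel := by omega
            obtain ⟨hv2, hinv2⟩ := ih w (h-1) (solveGo fuel (w-1) (h+1) d).2 hpre2 hf2 hinv1
            have hrec := F_rec w h hw1 hh0 hb1
            rw [if_pos hpos] at hrec
            simp only [solveGo, Std.HashMap.get?_eq_getElem?, hm, if_neg hb1, if_neg hb2, if_pos hpos]
            constructor
            · simp only [hv1, hv2, hrec]
            · intro a b v hv
              rw [hm_get?_insert] at hv
              by_cases hab : (a, b) = (w, h)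
              · rw [if_pos hab] at hv
                obtain ⟨rfl, rfl⟩ := Prod.mk.injEq .. ▸ hab
                refine ⟨hp, ?_⟩
                simp only [Option.some.injEq] at hv
                rw [← hv, hv1, hv2, hrec]
              · rw [if_neg hab] at hv
                exact hinv2 a b v hv
          · have h0 : h = 0 := by omega
            have hrec := F_rec w h hw1 hh0 hb1
            rw [if_neg hpos] at hrec
            simp only [solveGo, Std.HashMap.get?_eq_getElem?, hm, if_neg hb1, if_neg hb2, if_neg hpos]
            constructor
            · simp only [hv1, hrec]
            · intro a b v hv
              rw [hm_get?_insert] at hv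
              by_cases hab : (a, b) = (w, h)
              · rw [if_pos hab] at hv
                obtain ⟨rfl, rfl⟩ := Prod.mk.injEq .. ▸ hab
                refine ⟨hp, ?_⟩
                simp only [Option.some.injEq] at hv
                rw [← hv, hv1, hrec]
              · rw [if_neg hab] at hv
                exact hinv1 a b v hv

theorem solve_alt_eq_F (w h : Int) (hp : Pre_solve w h) : solve_alt w h = F w h := by
  have hn : 0 ≤ 2*w+h := by unfold Pre_solve at hp; omega
  show binomPy (2*w+h) w - binomPy (2*w+h) (w-1) = _
  unfold F
  rw [binomPy_eq_chooseZ _ _ hn, binomPy_eq_chooseZ _ _ hn]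

-- ===== VERDICT (by name: the statement is the Claim_ definition above) =====
theorem solve_spec : Claim_equal_solve := by
  intro w h _ hp
  unfold Spec_solve solve
  rw [solve_alt_eq_F w h hp]
  exact (solveGo_correct _ w h _ hp (by omega)
    (by intro a b v hv; simp [Std.HashMap.get?_eq_getElem?] at hv)).1
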